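-- pv_equiv track=rewrite | github.com/Ra-Light/skillfactory | module_0/Predictor.py | find_sub_range
-- ===== SOURCE A (Python) =====
-- def find_sub_range(number_to_predict, range_start, range_end,
--                    ranges_count=2):
--     """Разбивает интервал на суб интервалы и ищет какому из них принадлежит числою
--     Найденый интервал возвращается как результат работы"""
--
--     # вычмсляем длину субинтервалa
--     sub_range_len = (range_end - range_start) // ranges_count
--
--     # генерируем суб интервалы
--     sub_ranges = [(range_start + i * sub_range_len,
--                    range_start + i * sub_range_len + sub_range_len
--                        if i < (ranges_count - 1) else range_end)
--                   for i in range(0, ranges_count)]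
--
--     # ищем интервал, которому принадлежит угадываемое число
--     found_sub_range = list(filter(lambda x: x[0] <= number_to_predict <= x[1], sub_ranges))
--
--     return found_sub_range
-- ===== SOURCE B (Python) =====
-- def find_sub_range(number_to_predict, range_start, range_end,
--                    ranges_count=2):
--     """Locate the subinterval(s) of [range_start, range_end] (split into
--     ranges_count equal closed pieces, the last one ending at range_end)
--     that contain the number, in O(1) by integer division instead of
--     scanning every piece."""
--     sub_len = (range_end - range_start) // ranges_count
--     found = []
--     if sub_len > 0:
--         q, r = divmod(number_to_predict - range_start, sub_len)
--         if r == 0 and 1 <= q <= ranges_count - 1: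
--             # the number sits on a boundary, so it also belongs to the piece ending there
--             found.append((range_start + (q - 1) * sub_len,
--                           range_start + q * sub_len))
--         if 0 <= q < ranges_count - 1:
--             found.append((range_start + q * sub_len,
--                           range_start + (q + 1) * sub_len))
--     last_start = range_start + (ranges_count - 1) * sub_len
--     if last_start <= number_to_predict <= range_end:
--         found.append((last_start, range_end))
--     return found
-- ===== Notes on version B (the rewrite author's own statement) =====
-- stated objective: faster
-- what changed: B locates the containing piece directly by divmod (adding the neighbouring piece when the number sits exactly on a boundary) instead of generating all ranges_count subintervals and filtering them; Pre_ excludes ranges_count = 0 (ZeroDivisionError) and negative counts, which are outside the natural domain of a split count.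
-- intended difference: When the interval is too short to split (0 <= range_end-range_start < ranges_count, so the piece length is 0), ranges_count >= 2 and the number equals range_start, A returns ranges_count-1 duplicate zero-width pairs (range_start, range_start) before the final piece - an artefact of filtering degenerate pieces - while B returns only the final piece (range_start, range_end), the one meaningful subinterval. — e.g. on find_sub_range(0, 0, 1, 2): A returns [(0, 0), (0, 1)], B returns [(0, 1)]
-- outside the precondition, e.g. on find_sub_range(-5, 0, -4, -2): A returns [], B returns [(-6, -4)]
import Mathlib
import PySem

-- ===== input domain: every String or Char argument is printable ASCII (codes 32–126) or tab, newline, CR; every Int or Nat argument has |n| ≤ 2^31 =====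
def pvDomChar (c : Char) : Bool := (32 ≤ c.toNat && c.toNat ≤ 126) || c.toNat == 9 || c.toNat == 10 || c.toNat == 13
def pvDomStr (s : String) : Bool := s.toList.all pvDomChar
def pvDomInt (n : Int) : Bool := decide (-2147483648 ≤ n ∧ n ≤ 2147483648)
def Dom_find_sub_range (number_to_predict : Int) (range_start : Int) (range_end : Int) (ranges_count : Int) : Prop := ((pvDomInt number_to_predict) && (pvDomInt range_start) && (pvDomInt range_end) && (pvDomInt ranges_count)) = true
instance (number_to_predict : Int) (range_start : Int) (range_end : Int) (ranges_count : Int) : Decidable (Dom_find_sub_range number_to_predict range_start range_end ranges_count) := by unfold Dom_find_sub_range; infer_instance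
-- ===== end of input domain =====

-- B finds the containing piece directly by divmod (plus the neighbouring piece on an exact
-- boundary) instead of generating all ranges_count subintervals and filtering (objective: faster).

-- ===== PORT A =====
def find_sub_range (number_to_predict : Int) (range_start : Int) (range_end : Int) (ranges_count : Int) : List (Int × Int) :=
  let sub_range_len := PySem.Int.floordiv (range_end - range_start) ranges_count
  let sub_ranges := (PySem.List.pyRange 0 ranges_count 1).map (fun i =>
    (range_start + i * sub_range_len,
     if i < ranges_count - 1 then range_start + i * sub_range_len + sub_range_len
     else range_end))
  sub_ranges.filter (fun x => decide (x.1 ≤ number_to_predict) && decide (number_to_predict ≤ x.2))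

-- ===== PORT B =====
def find_sub_range_alt (number_to_predict : Int) (range_start : Int) (range_end : Int) (ranges_count : Int) : List (Int × Int) :=
  let sub_len := PySem.Int.floordiv (range_end - range_start) ranges_count
  let found : List (Int × Int) :=
    if sub_len > 0 then
      -- q, r = divmod(number_to_predict - range_start, sub_len)  (sub_len > 0, so defined)
      let q := PySem.Int.floordiv (number_to_predict - range_start) sub_len
      let r := PySem.Int.mod (number_to_predict - range_start) sub_len
      let f1 : List (Int × Int) :=
        if r = 0 ∧ 1 ≤ q ∧ q ≤ ranges_count - 1 then
          [(range_start + (q - 1) * sub_len, range_start + q * sub_len)]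
        else []
      if 0 ≤ q ∧ q < ranges_count - 1 then
        f1 ++ [(range_start + q * sub_len, range_start + (q + 1) * sub_len)]
      else f1
    else []
  let last_start := range_start + (ranges_count - 1) * sub_len
  if last_start ≤ number_to_predict ∧ number_to_predict ≤ range_end then
    found ++ [(last_start, range_end)]
  else found

-- ===== PRECONDITION & SPEC =====
-- Pre_ excludes ranges_count = 0, on which A raises ZeroDivisionError, and negative
-- ranges_count, which is outside the natural domain of a split count (A returns [] there
-- only because range() is empty).
def Pre_find_sub_range (number_to_predict : Int) (range_start : Int) (range_end : Int) (ranges_count : Int) : Prop := 1 ≤ ranges_count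
instance (number_to_predict : Int) (range_start : Int) (range_end : Int) (ranges_count : Int) : Decidable (Pre_find_sub_range number_to_predict range_start range_end ranges_count) := by unfold Pre_find_sub_range; infer_instance
def pvWitness_find_sub_range : Int × Int × Int × Int := (3, 0, 10, 2)

-- When the interval is too short to split (0 ≤ range_end-range_start < ranges_count, piece
-- length 0), ranges_count ≥ 2 and the number equals range_start, A returns ranges_count-1
-- duplicate zero-width pairs (range_start, range_start) before the final piece — an artefact
-- of filtering degenerate pieces — while B returns only the final piece
-- (range_start, range_end), the one meaningful subinterval.
def D_find_sub_range (number_to_predict : Int) (range_start : Int) (range_end : Int) (ranges_count : Int) : Prop :=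
  0 ≤ range_end - range_start ∧ range_end - range_start < ranges_count ∧
  number_to_predict = range_start ∧ 2 ≤ ranges_count
instance (number_to_predict : Int) (range_start : Int) (range_end : Int) (ranges_count : Int) : Decidable (D_find_sub_range number_to_predict range_start range_end ranges_count) := by unfold D_find_sub_range; infer_instance

def Spec_find_sub_range (number_to_predict : Int) (range_start : Int) (range_end : Int) (ranges_count : Int) (out : List (Int × Int)) : Prop := ¬ D_find_sub_range number_to_predict range_start range_end ranges_count → out = find_sub_range_alt number_to_predict range_start range_end ranges_count
instance (number_to_predict : Int) (range_start : Int) (range_end : Int) (ranges_count : Int) (out : List (Int × Int)) : Decidable (Spec_find_sub_range number_to_predict range_start range_end ranges_count out) := by unfold Spec_find_sub_range; infer_instance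

def pvDiffWitness_find_sub_range : Int × Int × Int × Int := (0, 0, 1, 2)
def pvDiffWitnessOut_find_sub_range : (List (Int × Int)) × (List (Int × Int)) := ([(0, 0), (0, 1)], [(0, 1)])

-- ===== CLAIM (what is proved, stated in full; the proofs are below) =====
def Claim_unchanged_find_sub_range : Prop := ∀ (number_to_predict : Int) (range_start : Int) (range_end : Int) (ranges_count : Int), Dom_find_sub_range number_to_predict range_start range_end ranges_count → Pre_find_sub_range number_to_predict range_start range_end ranges_count → Spec_find_sub_range number_to_predict range_start range_end ranges_count (find_sub_range number_to_predict range_start range_end ranges_count)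
def Claim_changed_find_sub_range : Prop := Dom_find_sub_range (pvDiffWitness_find_sub_range.1) (pvDiffWitness_find_sub_range.2.1) (pvDiffWitness_find_sub_range.2.2.1) (pvDiffWitness_find_sub_range.2.2.2) ∧ Pre_find_sub_range (pvDiffWitness_find_sub_range.1) (pvDiffWitness_find_sub_range.2.1) (pvDiffWitness_find_sub_range.2.2.1) (pvDiffWitness_find_sub_range.2.2.2) ∧ D_find_sub_range (pvDiffWitness_find_sub_range.1) (pvDiffWitness_find_sub_range.2.1) (pvDiffWitness_find_sub_range.2.2.1) (pvDiffWitness_find_sub_range.2.2.2) ∧ find_sub_range (pvDiffWitness_find_sub_range.1) (pvDiffWitness_find_sub_range.2.1) (pvDiffWitness_find_sub_range.2.2.1) (pvDiffWitness_find_sub_range.2.2.2) = pvDiffWitnessOut_find_sub_range.1 ∧ find_sub_range_alt (pvDiffWitness_find_sub_range.1) (pvDiffWitness_find_sub_range.2.1) (pvDiffWitness_find_sub_range.2.2.1) (pvDiffWitness_find_sub_range.2.2.2) = pvDiffWitnessOut_find_sub_range.2 ∧ pvDiffWitnessOut_find_sub_range.1 ≠ pvDiffWitnessOut_find_sub_r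ange.2
def Claim_exact_find_sub_range : Prop := ∀ (number_to_predict : Int) (range_start : Int) (range_end : Int) (ranges_count : Int), Dom_find_sub_range number_to_predict range_start range_end ranges_count → Pre_find_sub_range number_to_predict range_start range_end ranges_count → D_find_sub_range number_to_predict range_start range_end ranges_count → find_sub_range number_to_predict range_start range_end ranges_count ≠ find_sub_range_alt number_to_predict range_start range_end ranges_count

-- ===== LEMMAS AND PROOFS =====

-- filter of an initial integer range by a predicate that can only hold at two adjacent points
lemma filter_pyRange_two (k : Nat) (p : Int → Bool) (a : Int)
    (h : ∀ j : Int, 0 ≤ j → j < (k : Int) → p j = true → j = a ∨ j = a + 1) :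
    (PySem.List.pyRange 0 (k : Int) 1).filter p =
      (if 0 ≤ a ∧ a < (k : Int) ∧ p a then [a] else []) ++
      (if 0 ≤ a + 1 ∧ a + 1 < (k : Int) ∧ p (a + 1) then [a + 1] else []) := by
  induction k with
  | zero =>
      rw [Nat.cast_zero, PySem.List.pyRange_one_eq_nil le_rfl]
      split_ifs with h1 h2 h2 <;> first | rfl | omega
  | succ m ih =>
      have hsucc : ((m + 1 : Nat) : Int) = (m : Int) + 1 := by push_cast; ring
      rw [hsucc, PySem.List.pyRange_one_succ_right (Int.natCast_nonneg m),
        List.filter_append]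
      rw [ih (fun j h0 hj hp => h j h0 (by omega) hp)]
      by_cases hpm : p (m : Int) = true
      · rcases h (m : Int) (Int.natCast_nonneg m) (by omega) hpm with hma | hmb
        · rw [if_neg (by rintro ⟨-, h2, -⟩; omega :
                ¬(0 ≤ a ∧ a < (m : Int) ∧ p a = true)),
              if_neg (by rintro ⟨-, h2, -⟩; omega :
                ¬(0 ≤ a + 1 ∧ a + 1 < (m : Int) ∧ p (a + 1) = true)),
              if_neg (by rintro ⟨-, h2, -⟩; omega :
                ¬(0 ≤ a + 1 ∧ a + 1 < (m : Int) + 1 ∧ p (a + 1) = true)),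
              if_pos (⟨by omega, by omega, by rw [← hma]; exact hpm⟩ :
                (0 ≤ a ∧ a < (m : Int) + 1 ∧ p a = true))]
          simp [List.filter, ← hma, hpm]
        · have haeq : (0 ≤ a ∧ a < (m : Int) ∧ p a = true) ↔
              (0 ≤ a ∧ a < (m : Int) + 1 ∧ p a = true) := by
            constructor <;> rintro ⟨x, y, z⟩ <;> exact ⟨x, by omega, z⟩
          rw [if_congr haeq rfl rfl,
              if_neg (by rintro ⟨-, h2, -⟩; omega :
                ¬(0 ≤ a + 1 ∧ a + 1 < (m : Int) ∧ p (a + 1) = true)),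
              if_pos (⟨by omega, by omega, by rw [← hmb]; exact hpm⟩ :
                (0 ≤ a + 1 ∧ a + 1 < (m : Int) + 1 ∧ p (a + 1) = true))]
          simp [List.filter, ← hmb, hpm]
      · have hpm' : p (m : Int) = false := eq_false_of_ne_true hpm
        have e1 : (0 ≤ a ∧ a < (m : Int) ∧ p a = true) ↔
            (0 ≤ a ∧ a < (m : Int) + 1 ∧ p a = true) := by
          constructor <;> rintro ⟨x, y, z⟩
          · exact ⟨x, by omega, z⟩
          · refine ⟨x, ?_, z⟩
            rcases (by omega : a < (m : Int) ∨ a = (m : Int)) with h' | h'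
            · exact h'
            · rw [h'] at z; rw [z] at hpm'; cases hpm'
        have e2 : (0 ≤ a + 1 ∧ a + 1 < (m : Int) ∧ p (a + 1) = true) ↔
            (0 ≤ a + 1 ∧ a + 1 < (m : Int) + 1 ∧ p (a + 1) = true) := by
          constructor <;> rintro ⟨x, y, z⟩
          · exact ⟨x, by omega, z⟩
          · refine ⟨x, ?_, z⟩
            rcases (by omega : a + 1 < (m : Int) ∨ a + 1 = (m : Int)) with h' | h'
            · exact h'
            · rw [h'] at z; rw [z] at hpm'; cases hpm'
        rw [if_congr e1 rfl rfl, if_congr e2 rfl rfl]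
        simp [List.filter, hpm']

-- the filtered non-last subintervals equal B's divmod computation
lemma pv_inner (n s L : Int) (k : Nat) (hD : ¬(L = 0 ∧ n = s ∧ 1 ≤ (k : Int))) :
    (((PySem.List.pyRange 0 (k : Int) 1).map (fun i => (s + i * L, s + i * L + L))).filter
        (fun x => decide (x.1 ≤ n) && decide (n ≤ x.2))) =
    (if L > 0 then
       let q := PySem.Int.floordiv (n - s) L
       let r := PySem.Int.mod (n - s) L
       let f1 : List (Int × Int) :=
         if r = 0 ∧ 1 ≤ q ∧ q ≤ (k : Int) then [(s + (q - 1) * L, s + q * L)] else []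
       if 0 ≤ q ∧ q < (k : Int) then f1 ++ [(s + q * L, s + (q + 1) * L)] else f1
     else []) := by
  rw [List.filter_map]
  by_cases hL : L > 0
  · rw [if_pos hL]
    have hbr : (PySem.Int.floordiv (n - s) L) * L ≤ n - s ∧
        n - s < (PySem.Int.floordiv (n - s) L + 1) * L :=
      (PySem.Int.floordiv_eq_iff_of_pos hL).mp rfl
    have hmod : (PySem.Int.floordiv (n - s) L) * L + PySem.Int.mod (n - s) L = n - s := by
      have := PySem.Int.floordiv_mul_add_mod (n - s) L
      linarith
    have hr0 : 0 ≤ PySem.Int.mod (n - s) L := PySem.Int.mod_nonneg _ hL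
    have hrL : PySem.Int.mod (n - s) L < L := PySem.Int.mod_lt _ hL
    set q := PySem.Int.floordiv (n - s) L with hq
    set r := PySem.Int.mod (n - s) L with hrdef
    have hcand : ∀ j : Int, 0 ≤ j → j < (k : Int) →
        ((fun x : Int × Int => decide (x.1 ≤ n) && decide (n ≤ x.2)) ∘
          (fun i => (s + i * L, s + i * L + L))) j = true → j = (q - 1) ∨ j = (q - 1) + 1 := by
      intro j _ _ hp
      simp only [Function.comp, Bool.and_eq_true, decide_eq_true_iff] at hp
      obtain ⟨h1, h2⟩ := hp
      have hjq : j < q + 1 := by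
        have hml : j * L < (q + 1) * L := by nlinarith [hbr.2]
        exact lt_of_mul_lt_mul_right hml (le_of_lt hL)
      have hqj : q ≤ j + 1 := by
        have hml : q * L ≤ (j + 1) * L := by nlinarith [hbr.1]
        exact le_of_mul_le_mul_right hml hL
      omega
    rw [filter_pyRange_two k _ (q - 1) hcand, List.map_append]
    have hc1 : (0 ≤ q - 1 ∧ q - 1 < (k : Int) ∧
        ((fun x : Int × Int => decide (x.1 ≤ n) && decide (n ≤ x.2)) ∘
          (fun i => (s + i * L, s + i * L + L))) (q - 1) = true) ↔
        (r = 0 ∧ 1 ≤ q ∧ q ≤ (k : Int)) := by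
      simp only [Function.comp, Bool.and_eq_true, decide_eq_true_iff]
      constructor
      · rintro ⟨x, y, z1, z2⟩
        refine ⟨by nlinarith, by omega, by omega⟩
      · rintro ⟨x, y, z⟩
        refine ⟨by omega, by omega, by nlinarith, by nlinarith⟩
    have hc2 : (0 ≤ q - 1 + 1 ∧ q - 1 + 1 < (k : Int) ∧
        ((fun x : Int × Int => decide (x.1 ≤ n) && decide (n ≤ x.2)) ∘
          (fun i => (s + i * L, s + i * L + L))) (q - 1 + 1) = true) ↔
        (0 ≤ q ∧ q < (k : Int)) := by
      have hq1 : q - 1 + 1 = q := by ring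
      rw [hq1]
      simp only [Function.comp, Bool.and_eq_true, decide_eq_true_iff]
      constructor
      · rintro ⟨x, y, -⟩; exact ⟨x, y⟩
      · rintro ⟨x, y⟩; exact ⟨x, y, by nlinarith, by nlinarith⟩
    rw [show (if 0 ≤ q - 1 ∧ q - 1 < (k : Int) ∧
          ((fun x : Int × Int => decide (x.1 ≤ n) && decide (n ≤ x.2)) ∘
            (fun i => (s + i * L, s + i * L + L))) (q - 1) = true then [q - 1] else []) =
        (if r = 0 ∧ 1 ≤ q ∧ q ≤ (k : Int) then [q - 1] else []) from if_congr hc1 rfl rfl,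
        show (if 0 ≤ q - 1 + 1 ∧ q - 1 + 1 < (k : Int) ∧
          ((fun x : Int × Int => decide (x.1 ≤ n) && decide (n ≤ x.2)) ∘
            (fun i => (s + i * L, s + i * L + L))) (q - 1 + 1) = true then [q - 1 + 1] else []) =
        (if 0 ≤ q ∧ q < (k : Int) then [q] else []) from by
          have hqq : q - 1 + 1 = q := by ring
          rw [if_congr hc2 rfl rfl, hqq]]
    simp only []
    split_ifs with hA hB hB
    · simp only [List.map_cons, List.map_nil]
      congr 2 <;> [skip; congr 1] <;> ring_nf
    · simp only [List.map_cons, List.map_nil, List.append_nil]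
      congr 2
      ring
    · simp only [List.map_nil, List.map_cons, List.nil_append]
      congr 2
      ring
    · rfl
  · rw [if_neg hL]
    by_cases hL0 : L = 0
    · subst hL0
      by_cases hns : n = s
      · have hk0 : ¬ (1 ≤ (k : Int)) := fun h1 => hD ⟨rfl, hns, h1⟩
        have : k = 0 := by omega
        subst this
        rw [Nat.cast_zero, PySem.List.pyRange_one_eq_nil le_rfl]
        rfl
      · have hnil : (List.filter ((fun x : Int × Int => decide (x.1 ≤ n) && decide (n ≤ x.2)) ∘
            fun i : Int => (s + i * 0, s + i * 0 + 0)) (PySem.List.pyRange 0 (k : Int) 1)) = [] := by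
          apply List.filter_eq_nil_iff.mpr
          intro x _
          simp only [Function.comp, Bool.and_eq_true, decide_eq_true_iff, not_and]
          intro h1 h2
          exact hns (by omega)
        rw [hnil, List.map_nil]
    · have hnil : (List.filter ((fun x : Int × Int => decide (x.1 ≤ n) && decide (n ≤ x.2)) ∘
          fun i : Int => (s + i * L, s + i * L + L)) (PySem.List.pyRange 0 (k : Int) 1)) = [] := by
        apply List.filter_eq_nil_iff.mpr
        intro x _
        simp only [Function.comp, Bool.and_eq_true, decide_eq_true_iff, not_and]
        intro h1 h2
        nlinarith [h1, h2, lt_of_le_of_ne (not_lt.mp hL) hL0]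
      rw [hnil, List.map_nil]

-- ===== VERDICT (by name: the statements are the Claim_ definitions above) =====
theorem find_sub_range_spec : Claim_unchanged_find_sub_range := by
  intro n s e c _ hpre hD
  unfold Pre_find_sub_range at hpre
  simp only [find_sub_range, find_sub_range_alt]
  set L := PySem.Int.floordiv (e - s) c with hLdef
  have hkc : (((c - 1).toNat : Int)) = c - 1 := Int.toNat_of_nonneg (by omega)
  set k := (c - 1).toNat with hkdef
  have hDk : ¬(L = 0 ∧ n = s ∧ 1 ≤ (k : Int)) := by
    rintro ⟨hL0, hns, hk1⟩
    apply hD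
    have hbounds : 0 * c ≤ e - s ∧ e - s < (0 + 1) * c :=
      (PySem.Int.floordiv_eq_iff_of_pos (by omega)).mp hL0
    refine ⟨by linarith [hbounds.1], by linarith [hbounds.2], hns, by omega⟩
  simp only [show c - 1 = (k : Int) from hkc.symm]
  rw [show c = (k : Int) + 1 by omega,
      PySem.List.pyRange_one_succ_right (Int.natCast_nonneg k),
      List.map_append, List.filter_append]
  have hmap : (PySem.List.pyRange 0 (k : Int) 1).map
      (fun i => (s + i * L, if i < (k : Int) then s + i * L + L else e)) =
      (PySem.List.pyRange 0 (k : Int) 1).map (fun i => (s + i * L, s + i * L + L)) := by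
    apply List.map_congr_left
    intro i hi
    rw [if_pos (PySem.List.mem_pyRange_one.mp hi).2]
  rw [hmap]
  have hsingle : List.map
      (fun i => (s + i * L, if i < (k : Int) then s + i * L + L else e)) [(k : Int)] =
      [(s + (k : Int) * L, e)] := by
    simp
  rw [hsingle]
  have hinner := pv_inner n s L k hDk
  by_cases hlast : s + (k : Int) * L ≤ n ∧ n ≤ e
  · rw [if_pos hlast]
    have hfs : List.filter (fun x : Int × Int => decide (x.1 ≤ n) && decide (n ≤ x.2))
        [(s + (k : Int) * L, e)] = [(s + (k : Int) * L, e)] := by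
      simp [hlast.1, hlast.2]
    rw [hfs, hinner]
  · rw [if_neg hlast]
    have hfs : List.filter (fun x : Int × Int => decide (x.1 ≤ n) && decide (n ≤ x.2))
        [(s + (k : Int) * L, e)] = [] := by
      by_cases h1 : s + (k : Int) * L ≤ n
      · have h2 : ¬ n ≤ e := fun h2 => hlast ⟨h1, h2⟩
        simp [List.filter, h1, h2]
      · simp [List.filter, h1]
    rw [hfs, List.append_nil]
    exact hinner

theorem find_sub_range_changed : Claim_changed_find_sub_range := by
  unfold Claim_changed_find_sub_range; decide

theorem find_sub_range_tight : Claim_exact_find_sub_range := by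
  intro n s e c _ hpre hD hEq
  unfold Pre_find_sub_range at hpre
  obtain ⟨h1, h2, h3, h4⟩ := hD
  have hL : PySem.Int.floordiv (e - s) c = 0 := by
    apply (PySem.Int.floordiv_eq_iff_of_pos (by omega)).mpr
    constructor
    · linarith
    · linarith
  have hse : s ≤ e := by omega
  have hlenB : (find_sub_range_alt n s e c).length = 1 := by
    simp only [find_sub_range_alt, hL]
    rw [if_neg (by omega : ¬ (0 : Int) > 0),
        if_pos (by constructor <;> [nlinarith; omega])]
    rfl
  have hlenA : (find_sub_range n s e c).length = c.toNat := by
    simp only [find_sub_range, hL]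
    have hall : ∀ x ∈ (PySem.List.pyRange 0 c 1).map (fun i =>
        ((s + i * 0 : Int), if i < c - 1 then s + i * 0 + 0 else e)),
        (fun x : Int × Int => decide (x.1 ≤ n) && decide (n ≤ x.2)) x = true := by
      intro x hx
      obtain ⟨i, hi, rfl⟩ := List.mem_map.mp hx
      simp only [Bool.and_eq_true, decide_eq_true_iff]
      constructor
      · omega
      · split_ifs <;> omega
    rw [List.filter_eq_self.mpr hall, List.length_map, PySem.List.length_pyRange_one]
    omega
  rw [hEq] at hlenA
  rw [hlenB] at hlenA
  omega
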